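-- pv_equiv track=rewrite | github.com/Jxun-h/BOJ | 프로그래머스/lv1/42840. 모의고사/모의고사.py | solution
-- ===== SOURCE A (Python) =====
-- from itertools import cycle
--
-- def solution(ans):
--     a = [1,2,3,4,5]
--     b = [2,1,2,3,2,4,2,5]
--     c = [3,3,1,1,2,2,4,4,5,5]
--
--     answer = []
--
--     ac = 0
--     bc = 0
--     cc = 0
--
--     for ansa, ansb, ansc, ansr in zip(cycle(a), cycle(b), cycle(c), ans):
--         if ansa == ansr : ac+=1
--         if ansb == ansr : bc+=1
--         if ansc == ansr : cc+=1
--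
--     if ac >= bc:
--         if ac >= cc:
--             answer.append(1)
--     if bc >= ac:
--         if bc >= cc:
--             answer.append(2)
--     if cc >= ac:
--         if cc >= bc:
--             answer.append(3)
--
--     return answer
-- ===== SOURCE B (Python) =====
-- def solution(ans):
--     # Histogram pass: bucket each answer by (position mod 40, value); 40 = lcm of the
--     # three pattern lengths, so a pattern's score is a pattern-independent lookup sum.
--     keys = [(i % 40, r) for i, r in enumerate(ans)]
--     hist = {}
--     for k in keys:
--         hist[k] = hist.get(k, 0) + 1
--     pats = [[1, 2, 3, 4, 5],
--             [2, 1, 2, 3, 2, 4, 2, 5],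
--             [3, 3, 1, 1, 2, 2, 4, 4, 5, 5]]
--     scores = [sum(hist.get((j, p[j % len(p)]), 0) for j in range(40)) for p in pats]
--     m = max(scores)
--     return [k + 1 for k, s in enumerate(scores) if s == m]
-- ===== Notes on version B (the rewrite author's own statement) =====
-- stated objective: alternative
-- what changed: Replaces A's simultaneous three-counter scan with chained comparison if-blocks by a single histogram pass bucketing answers by (index mod 40, value) -- 40 being the lcm of the pattern lengths -- followed by a pattern-independent 40-term lookup sum per pattern and a max-then-filter selection.
import Mathlib
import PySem

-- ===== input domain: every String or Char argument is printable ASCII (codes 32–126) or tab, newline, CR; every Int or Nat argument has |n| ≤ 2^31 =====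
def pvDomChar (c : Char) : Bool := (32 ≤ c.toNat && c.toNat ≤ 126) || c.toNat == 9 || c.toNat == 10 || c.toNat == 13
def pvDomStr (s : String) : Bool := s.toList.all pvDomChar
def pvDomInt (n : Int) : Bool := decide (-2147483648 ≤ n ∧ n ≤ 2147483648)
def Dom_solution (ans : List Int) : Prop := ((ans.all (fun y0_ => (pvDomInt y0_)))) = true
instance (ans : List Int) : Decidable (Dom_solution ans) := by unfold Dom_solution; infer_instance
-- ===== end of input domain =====

-- B replaces A's simultaneous three-counter scan with a single histogram pass keyed by
-- (index mod 40, answer) — 40 = lcm of the pattern lengths — followed by pattern-independent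
-- lookup sums and a max-then-filter selection (objective: alternative).

-- ===== PORT A =====
-- zip(cycle(p), ans) pairs ans[i] with p[i % len(p)]; ported as a fold over enumerate(ans).
def solution (ans : List Int) : List Int :=
  let a : List Int := [1, 2, 3, 4, 5]
  let b : List Int := [2, 1, 2, 3, 2, 4, 2, 5]
  let c : List Int := [3, 3, 1, 1, 2, 2, 4, 4, 5, 5]
  let st := (PySem.List.enumerate ans 0).foldl
    (fun (s : Int × Int × Int) pr =>
      let ac := if PySem.List.pyGetD a (PySem.Int.mod pr.1 5) 0 == pr.2 then s.1 + 1 else s.1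
      let bc := if PySem.List.pyGetD b (PySem.Int.mod pr.1 8) 0 == pr.2 then s.2.1 + 1 else s.2.1
      let cc := if PySem.List.pyGetD c (PySem.Int.mod pr.1 10) 0 == pr.2 then s.2.2 + 1 else s.2.2
      (ac, bc, cc)) (0, 0, 0)
  let ac := st.1
  let bc := st.2.1
  let cc := st.2.2
  (if ac ≥ bc then (if ac ≥ cc then [1] else []) else []) ++
  (if bc ≥ ac then (if bc ≥ cc then [2] else []) else []) ++
  (if cc ≥ ac then (if cc ≥ bc then [3] else []) else [])

-- ===== PORT B =====
def solution_alt (ans : List Int) : List Int :=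
  let keys : List (Int × Int) :=
    (PySem.List.enumerate ans 0).map (fun pr => (PySem.Int.mod pr.1 40, pr.2))
  let hist : PySem.Dict (Int × Int) Int :=
    keys.foldl (fun d k => d.insert k (d.getD k 0 + 1)) PySem.Dict.empty
  let pats : List (List Int) := [[1, 2, 3, 4, 5],
                                 [2, 1, 2, 3, 2, 4, 2, 5],
                                 [3, 3, 1, 1, 2, 2, 4, 4, 5, 5]]
  let scores : List Int := pats.map (fun p =>
    ((PySem.List.pyRange 0 40 1).map (fun j =>
        hist.getD (j, PySem.List.pyGetD p (PySem.Int.mod j (p.length : Int)) 0) 0)).sum)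
  -- max(scores); scores always has 3 elements, so the default is never used
  let m := (PySem.List.max? scores (fun x => x)).getD 0
  ((PySem.List.enumerate scores 0).filter (fun pr => pr.2 == m)).map (fun pr => pr.1 + 1)

-- ===== PRECONDITION & SPEC =====
def Spec_solution (ans : List Int) (out : List Int) : Prop := out = solution_alt ans
instance (ans : List Int) (out : List Int) : Decidable (Spec_solution ans out) := by unfold Spec_solution; infer_instance

-- ===== CLAIM (what is proved, stated in full; the proofs are below) =====
def Claim_equal_solution : Prop := ∀ (ans : List Int), Dom_solution ans → Spec_solution ans (solution ans)

-- ===== LEMMAS AND PROOFS =====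

-- A's triple-counter fold equals the three per-pattern filter counts.
theorem pv_fold_eq_counts (L : List (Int × Int)) (x y z : Int) :
    L.foldl
      (fun (s : Int × Int × Int) pr =>
        let ac := if PySem.List.pyGetD [1, 2, 3, 4, 5] (PySem.Int.mod pr.1 5) 0 == pr.2 then s.1 + 1 else s.1
        let bc := if PySem.List.pyGetD [2, 1, 2, 3, 2, 4, 2, 5] (PySem.Int.mod pr.1 8) 0 == pr.2 then s.2.1 + 1 else s.2.1
        let cc := if PySem.List.pyGetD [3, 3, 1, 1, 2, 2, 4, 4, 5, 5] (PySem.Int.mod pr.1 10) 0 == pr.2 then s.2.2 + 1 else s.2.2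
        (ac, bc, cc)) (x, y, z)
    = (x + ((L.filter (fun pr => PySem.List.pyGetD [1, 2, 3, 4, 5] (PySem.Int.mod pr.1 5) 0 == pr.2)).length : Int),
       y + ((L.filter (fun pr => PySem.List.pyGetD [2, 1, 2, 3, 2, 4, 2, 5] (PySem.Int.mod pr.1 8) 0 == pr.2)).length : Int),
       z + ((L.filter (fun pr => PySem.List.pyGetD [3, 3, 1, 1, 2, 2, 4, 4, 5, 5] (PySem.Int.mod pr.1 10) 0 == pr.2)).length : Int)) := by
  induction L generalizing x y z with
  | nil => simp
  | cons hd tl ih =>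
    simp only [List.foldl_cons, List.filter_cons, ih]
    split_ifs <;> simp_all <;> omega

-- an indicator sum over a range not containing k vanishes
theorem pv_zero_sum (a b k r : Int) (g : Int → Int) (h : k < a ∨ b ≤ k) :
    ((PySem.List.pyRange a b 1).map
      (fun j => if ((k, r) : Int × Int) = (j, g j) then (1 : Int) else 0)).sum = 0 := by
  apply List.sum_eq_zero
  intro x hx
  rcases List.mem_map.1 hx with ⟨j, hj, rfl⟩
  rw [PySem.List.mem_pyRange_one] at hj
  have : ¬ ((k, r) : Int × Int) = (j, g j) := by
    intro he
    have : k = j := congrArg Prod.fst he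
    omega
  simp [this]

-- indicator sum over range(40) picks out exactly position k
theorem pv_indicator (k r : Int) (g : Int → Int) (hk0 : 0 ≤ k) (hk : k < 40) :
    ((PySem.List.pyRange 0 40 1).map
      (fun j => if ((k, r) : Int × Int) = (j, g j) then (1 : Int) else 0)).sum
    = if g k = r then 1 else 0 := by
  rw [PySem.List.pyRange_one_append 0 k 40 hk0 (le_of_lt hk),
      PySem.List.pyRange_one_append k (k + 1) 40 (by omega) (by omega),
      PySem.List.pyRange_one_singleton]
  simp only [List.map_append, List.sum_append, List.map_cons, List.map_nil, List.sum_cons,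
    List.sum_nil, pv_zero_sum 0 k k r g (Or.inr le_rfl),
    pv_zero_sum (k + 1) 40 k r g (Or.inl (by omega))]
  by_cases h : g k = r
  · simp [h]
  · simp only [Prod.ext_iff]
    rw [if_neg h, if_neg (fun hc => h hc.2.symm)]
    ring

-- the histogram lookup sum counts the matching pairs
theorem pv_sum_count (L : List (Int × Int)) (g : Int → Int) (h : ∀ pr ∈ L, 0 ≤ pr.1) :
    ((PySem.List.pyRange 0 40 1).map
      (fun j => ((L.map (fun pr => (PySem.Int.mod pr.1 40, pr.2))).count (j, g j) : Int))).sum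
    = ((L.filter (fun pr => g (PySem.Int.mod pr.1 40) == pr.2)).length : Int) := by
  induction L with
  | nil => simp
  | cons hd tl ih =>
    have hhd : 0 ≤ hd.1 := h hd (List.mem_cons_self)
    have htl : ∀ pr ∈ tl, 0 ≤ pr.1 := fun pr hpr => h pr (List.mem_cons_of_mem _ hpr)
    have hmem0 : (0 : Int) ≤ PySem.Int.mod hd.1 40 := PySem.Int.mod_nonneg hd.1 (by norm_num)
    have hmem40 : PySem.Int.mod hd.1 40 < 40 := PySem.Int.mod_lt hd.1 (by norm_num)
    simp only [List.map_cons, List.filter_cons]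
    have hcount : ∀ j : Int,
        ((((PySem.Int.mod hd.1 40, hd.2) :: tl.map (fun pr => (PySem.Int.mod pr.1 40, pr.2))).count
          (j, g j) : Int))
        = ((tl.map (fun pr => (PySem.Int.mod pr.1 40, pr.2))).count (j, g j) : Int)
          + (if ((PySem.Int.mod hd.1 40, hd.2) : Int × Int) = (j, g j) then 1 else 0) := by
      intro j
      simp [List.count_cons]
    simp only [hcount]
    rw [PySem.List.sum_map_add_int, ih htl, pv_indicator _ _ _ hmem0 hmem40]
    by_cases hc : g (PySem.Int.mod hd.1 40) = hd.2
    · rw [if_pos hc, if_pos (beq_iff_eq.mpr hc)]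
      push_cast [List.length_cons]
      ring
    · rw [if_neg hc, if_neg (show ¬ (g (PySem.Int.mod hd.1 40) == hd.2) = true from fun hb => hc (beq_iff_eq.mp hb))]
      ring

-- taking the key mod 40 first does not change the pattern index (pattern length divides 40)
theorem pv_mod_mod (i d : Int) (hd : 0 < d) (hdvd : d ∣ 40) :
    PySem.Int.mod (PySem.Int.mod i 40) d = PySem.Int.mod i d := by
  rw [PySem.Int.mod_eq_emod_of_pos (by norm_num : (0:Int) < 40),
      PySem.Int.mod_eq_emod_of_pos hd, PySem.Int.mod_eq_emod_of_pos hd]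
  exact Int.emod_emod_of_dvd i hdvd

-- max(scores) for a three-element list is the binary max.
theorem pv_max3 (x y z : Int) : (PySem.List.max? [x, y, z] (fun v => v)).getD 0 = max x (max y z) := by
  simp only [PySem.List.max?, List.foldl_cons, List.foldl_nil]
  split_ifs <;> simp_all <;> split_ifs <;> simp_all <;> omega

-- B's max-then-filter selection over three scores equals A's chained comparisons.
theorem pv_select (x y z : Int) :
    (if x ≥ y then (if x ≥ z then ([1] : List Int) else []) else []) ++
    (if y ≥ x then (if y ≥ z then [2] else []) else []) ++
    (if z ≥ x then (if z ≥ y then [3] else []) else [])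
    =
    ((PySem.List.enumerate [x, y, z] 0).filter
        (fun pr => pr.2 == (PySem.List.max? [x, y, z] (fun v => v)).getD 0)).map
      (fun pr => pr.1 + 1) := by
  simp only [pv_max3, PySem.List.enumerate, List.filter_cons, List.filter_nil, beq_iff_eq]
  have hxM : x ≤ max x (max y z) := le_max_left _ _
  have hyM : y ≤ max x (max y z) := le_trans (le_max_left _ _) (le_max_right _ _)
  have hzM : z ≤ max x (max y z) := le_trans (le_max_right _ _) (le_max_right _ _)
  have hM3 : max x (max y z) = x ∨ max x (max y z) = y ∨ max x (max y z) = z := by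
    rcases max_choice x (max y z) with h | h
    · exact Or.inl h
    · rcases max_choice y z with h' | h' <;> rw [h, h'] <;> simp
  generalize hg : max x (max y z) = M at *
  rcases hM3 with h | h | h <;> subst h <;> split_ifs <;>
    first
      | (exfalso; omega)
      | norm_num

-- every index produced by enumerate from 0 is nonnegative
theorem pv_enum_nonneg (ans : List Int) (s : Int) (hs : 0 ≤ s) :
    ∀ pr ∈ PySem.List.enumerate ans s, 0 ≤ pr.1 := by
  induction ans generalizing s with
  | nil => simp [PySem.List.enumerate_nil]
  | cons hd tl ih =>
    intro pr hpr
    rw [PySem.List.enumerate_cons] at hpr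
    rcases List.mem_cons.1 hpr with h | h
    · simp [h, hs]
    · exact ih (s + 1) (by omega) pr h

-- B's histogram score equals the per-pattern filter count
theorem pv_score (ans : List Int) (p : List Int) (d : Int) (hd : 0 < d) (hdvd : d ∣ 40) :
    ((PySem.List.pyRange 0 40 1).map (fun j =>
        (((PySem.List.enumerate ans 0).map (fun pr => (PySem.Int.mod pr.1 40, pr.2))).foldl
            (fun dct k => dct.insert k (dct.getD k 0 + 1)) PySem.Dict.empty).getD
          (j, PySem.List.pyGetD p (PySem.Int.mod j d) 0) 0)).sum
    = (((PySem.List.enumerate ans 0).filter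
          (fun pr => PySem.List.pyGetD p (PySem.Int.mod pr.1 d) 0 == pr.2)).length : Int) := by
  have hcounter := PySem.Dict.foldl_insert_getD_add_one_eq_counter
    (xs := (PySem.List.enumerate ans 0).map (fun pr => (PySem.Int.mod pr.1 40, pr.2)))
  simp only [hcounter, PySem.Dict.getD_counter]
  rw [pv_sum_count _ (fun j => PySem.List.pyGetD p (PySem.Int.mod j d) 0)
        (pv_enum_nonneg ans 0 le_rfl)]
  congr 2
  apply List.filter_congr
  intro pr _
  rw [pv_mod_mod pr.1 d hd hdvd]

theorem pv_spec_aux (ans : List Int) : Spec_solution ans (solution ans) := by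
  unfold Spec_solution solution solution_alt
  simp only [List.map_cons, List.map_nil, List.length_cons, List.length_nil,
    pv_fold_eq_counts, zero_add,
    show ((1 + 1 + 1 + 1 + 1 : Nat) : Int) = 5 by norm_num,
    show ((1 + 1 + 1 + 1 + 1 + 1 + 1 + 1 : Nat) : Int) = 8 by norm_num,
    show ((1 + 1 + 1 + 1 + 1 + 1 + 1 + 1 + 1 + 1 : Nat) : Int) = 10 by norm_num]
  rw [pv_score ans [1, 2, 3, 4, 5] 5 (by norm_num) (by norm_num),
      pv_score ans [2, 1, 2, 3, 2, 4, 2, 5] 8 (by norm_num) (by norm_num),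
      pv_score ans [3, 3, 1, 1, 2, 2, 4, 4, 5, 5] 10 (by norm_num) (by norm_num)]
  exact pv_select _ _ _

-- ===== VERDICT (by name: the statement is the Claim_ definition above) =====
theorem solution_spec : Claim_equal_solution := fun ans _ => pv_spec_aux ans
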